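-- pv_equiv track=rewrite | github.com/Sujith-Kumar-2003/COMP6791-Information-Retrieval-and-Web-Search | Project1/NEARoperator.py | near_operator
-- ===== SOURCE A (Python) =====
-- def near_operator(term1, term2, k, positional_index):
--     """
--     Implements the NEAR operator to find documents where term1 and term2 appear within k tokens of each other.
--     """
--     result_docs = []
--     if term1 in positional_index and term2 in positional_index:
--         for doc_id in positional_index[term1]:
--             if doc_id in positional_index[term2]:
--                 positions1 = positional_index[term1][doc_id]
--                 positions2 = positional_index[term2][doc_id]
--                 for pos1 in positions1:
--                     for pos2 in positions2:
--                         if abs(pos1 - pos2) <= k: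
--                             result_docs.append(doc_id)
--     return result_docs
-- ===== SOURCE B (Python) =====
-- def _count_less(a, x):
--     """Number of elements of the sorted list a that are strictly below x
--     (hand-written binary search; the original module imports nothing)."""
--     lo, hi = 0, len(a)
--     while lo < hi:
--         mid = (lo + hi) // 2
--         if a[mid] < x:
--             lo = mid + 1
--         else:
--             hi = mid
--     return lo
--
--
-- def near_operator(term1, term2, k, positional_index):
--     """NEAR operator: documents where term1 and term2 occur within k positions,
--     one result entry per qualifying pair of positions."""
--     result_docs = []
--     if term1 not in positional_index or term2 not in positional_index:
--         return result_docs
--     postings1 = positional_index[term1]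
--     postings2 = positional_index[term2]
--     for doc_id in postings1:
--         if doc_id in postings2:
--             s2 = sorted(postings2[doc_id])
--             n = 0
--             for p in postings1[doc_id]:
--                 # positions q of term2 with p - k <= q <= p + k
--                 n += _count_less(s2, p + k + 1) - _count_less(s2, p - k)
--             result_docs += [doc_id] * n
--     return result_docs
-- ===== Notes on version B (the rewrite author's own statement) =====
-- stated objective: alternative
-- what changed: Per document, instead of scanning every (pos1,pos2) pair and appending on each hit, B sorts term2's positions once and for each term1 position counts the matches in [p-k, p+k] with two binary searches, then emits the doc id replicated by the total count.
import Mathlib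
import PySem

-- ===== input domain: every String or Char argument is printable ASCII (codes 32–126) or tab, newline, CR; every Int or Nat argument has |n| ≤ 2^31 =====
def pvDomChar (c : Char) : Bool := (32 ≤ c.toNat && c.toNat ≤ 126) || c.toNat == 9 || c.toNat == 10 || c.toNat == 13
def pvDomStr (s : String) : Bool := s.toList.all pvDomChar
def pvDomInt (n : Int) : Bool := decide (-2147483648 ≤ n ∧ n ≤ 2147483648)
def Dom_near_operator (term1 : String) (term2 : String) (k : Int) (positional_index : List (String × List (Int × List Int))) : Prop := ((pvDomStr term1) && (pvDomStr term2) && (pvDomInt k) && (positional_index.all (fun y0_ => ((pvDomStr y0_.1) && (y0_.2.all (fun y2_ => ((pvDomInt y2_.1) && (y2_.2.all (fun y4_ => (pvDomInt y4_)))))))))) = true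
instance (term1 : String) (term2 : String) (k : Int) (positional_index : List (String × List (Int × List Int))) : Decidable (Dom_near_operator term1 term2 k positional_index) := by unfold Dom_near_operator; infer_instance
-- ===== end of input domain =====

-- B replaces A's inner scan over all position pairs by sorting term2's positions once
-- per document and counting, per term1 position, the positions within k by binary
-- search, emitting the doc id replicated by the total count (alternative algorithm).

-- ===== PORT A =====
def near_operator (term1 : String) (term2 : String) (k : Int) (positional_index : List (String × List (Int × List Int))) : List Int :=
  let idx := PySem.Dict.mk positional_index
  if idx.contains term1 && idx.contains term2 then
    -- indexing after a successful membership test: the lookups below always succeed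
    let d1 := PySem.Dict.mk ((idx.get? term1).getD [])
    let d2 := PySem.Dict.mk ((idx.get? term2).getD [])
    d1.keys.foldl (fun acc doc_id =>
      if d2.contains doc_id then
        let positions1 := (d1.get? doc_id).getD []
        let positions2 := (d2.get? doc_id).getD []
        positions1.foldl (fun acc pos1 =>
          positions2.foldl (fun acc pos2 =>
            if |pos1 - pos2| ≤ k then acc ++ [doc_id] else acc) acc) acc
      else acc) []
  else []

-- ===== PORT B =====
-- hand-written binary search of Source B, exact step for step (the index mid is always in
-- range when the loop body runs, so `getD _ 0` is Python's a[mid])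
def countLessLoop (a : List Int) (x : Int) (lo hi : Nat) : Nat :=
  if lo < hi then
    if a.getD ((lo + hi) / 2) 0 < x then countLessLoop a x ((lo + hi) / 2 + 1) hi
    else countLessLoop a x lo ((lo + hi) / 2)
  else lo
termination_by hi - lo
decreasing_by all_goals omega

def countLess (a : List Int) (x : Int) : Nat := countLessLoop a x 0 a.length

def near_operator_alt (term1 : String) (term2 : String) (k : Int) (positional_index : List (String × List (Int × List Int))) : List Int :=
  let idx := PySem.Dict.mk positional_index
  if !(idx.contains term1) || !(idx.contains term2) then []
  else
    let postings1 := PySem.Dict.mk ((idx.get? term1).getD [])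
    let postings2 := PySem.Dict.mk ((idx.get? term2).getD [])
    postings1.keys.foldl (fun acc doc_id =>
      if postings2.contains doc_id then
        let s2 := PySem.List.sorted ((postings2.get? doc_id).getD []) (fun q => q)
        let n := ((postings1.get? doc_id).getD []).foldl
          (fun n p => n + ((countLess s2 (p + k + 1) : Int) - (countLess s2 (p - k) : Int))) 0
        acc ++ List.replicate n.toNat doc_id
      else acc) []

-- ===== PRECONDITION & SPEC =====
def Spec_near_operator (term1 : String) (term2 : String) (k : Int) (positional_index : List (String × List (Int × List Int))) (out : List Int) : Prop := out = near_operator_alt term1 term2 k positional_index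
instance (term1 : String) (term2 : String) (k : Int) (positional_index : List (String × List (Int × List Int))) (out : List Int) : Decidable (Spec_near_operator term1 term2 k positional_index out) := by unfold Spec_near_operator; infer_instance

-- ===== CLAIM (what is proved, stated in full; the proofs are below) =====
def Claim_equal_near_operator : Prop := ∀ (term1 : String) (term2 : String) (k : Int) (positional_index : List (String × List (Int × List Int))), Dom_near_operator term1 term2 k positional_index → Spec_near_operator term1 term2 k positional_index (near_operator term1 term2 k positional_index)

-- ===== LEMMAS AND PROOFS =====

-- countP of a list whose predicate holds exactly on the first r indices is r
lemma countP_eq_boundary (p : Int → Bool) :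
    ∀ (a : List Int) (r : Nat), r ≤ a.length →
    (∀ i (h : i < a.length), i < r → p a[i]) →
    (∀ i (h : i < a.length), r ≤ i → ¬ p a[i]) →
    a.countP p = r := by
  intro a
  induction a with
  | nil =>
    intro r hr _ _
    have : r = 0 := by simpa using hr
    subst this; simp
  | cons y t ih =>
    intro r hr h1 h2
    cases r with
    | zero =>
      rw [List.countP_eq_zero]
      intro z hz
      rcases List.mem_iff_getElem.mp hz with ⟨i, hi, rfl⟩
      exact h2 i hi (Nat.zero_le _)
    | succ r =>
      have hy : p y := h1 0 (by simp) (Nat.succ_pos _)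
      have ht : t.countP p = r := by
        apply ih r (by simpa using hr)
        · intro i hi hir
          have := h1 (i+1) (by simpa using Nat.succ_lt_succ hi) (Nat.succ_lt_succ hir)
          simpa using this
        · intro i hi hir
          have := h2 (i+1) (by simpa using Nat.succ_lt_succ hi) (Nat.succ_le_succ hir)
          simpa using this
      simp [hy, ht]

-- correctness of the binary-search loop on a sorted list
lemma countLessLoop_eq (a : List Int) (x : Int) (hs : a.Pairwise (· ≤ ·)) :
    ∀ (n lo hi : Nat), hi - lo = n → lo ≤ hi → hi ≤ a.length →
    (∀ i (h : i < a.length), i < lo → a[i] < x) →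
    (∀ i (h : i < a.length), hi ≤ i → ¬ a[i] < x) →
    countLessLoop a x lo hi = a.countP (fun q => decide (q < x)) := by
  have hmono : ∀ i j (hi : i < a.length) (hj : j < a.length), i ≤ j → a[i] ≤ a[j] := by
    intro i j hi hj hij
    rcases Nat.lt_or_ge i j with h | h
    · exact List.pairwise_iff_getElem.mp hs i j hi hj h
    · have : i = j := Nat.le_antisymm hij h
      subst this; exact le_refl _
  intro n
  induction n using Nat.strong_induction_on with
  | _ n ih =>
    intro lo hi hn hlohi hhi h1 h2
    rw [countLessLoop]
    by_cases hlt : lo < hi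
    · have hmid1 : lo ≤ (lo + hi) / 2 := by omega
      have hmid2 : (lo + hi) / 2 < hi := by omega
      have hmlen : (lo + hi) / 2 < a.length := by omega
      rw [List.getD_eq_getElem a 0 hmlen]
      simp only [hlt, if_true]
      by_cases hx : a[(lo + hi) / 2] < x
      · simp only [hx, if_true]
        apply ih (hi - ((lo + hi) / 2 + 1)) (by omega) _ _ rfl (by omega) hhi
        · intro i hilen hilo
          rcases Nat.lt_or_ge i ((lo + hi) / 2 + 1) with _ | _
          · calc a[i] ≤ a[(lo + hi) / 2] := hmono _ _ hilen hmlen (by omega)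
              _ < x := hx
          · omega
        · exact h2
      · simp only [hx, if_false]
        apply ih ((lo + hi) / 2 - lo) (by omega) _ _ rfl (by omega) (by omega) h1
        intro i hilen hile hcon
        exact hx (lt_of_le_of_lt (hmono _ _ hmlen hilen hile) hcon)
    · simp only [hlt, if_false]
      have : lo = hi := by omega
      subst this
      exact (countP_eq_boundary _ a lo (by omega)
        (fun i h hi => by
          have := h1 i h hi; simpa using this)
        (fun i h hi => by
          have := h2 i h hi; simpa using this)).symm

lemma countLess_eq (a : List Int) (x : Int) (hs : a.Pairwise (· ≤ ·)) :
    countLess a x = a.countP (fun q => decide (q < x)) := by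
  apply countLessLoop_eq a x hs (a.length - 0) 0 a.length rfl (Nat.zero_le _) (le_refl _)
  · intro i _ h; omega
  · intro i h hle; omega

-- splitting a strict-upper-bound count at a lower point
lemma countP_lt_split (a b : Int) (hab : a ≤ b) :
    ∀ (l : List Int), l.countP (fun q => decide (q < b)) =
      l.countP (fun q => decide (q < a)) + l.countP (fun q => decide (a ≤ q ∧ q < b)) := by
  intro l
  induction l with
  | nil => simp
  | cons y t ih =>
    simp only [List.countP_cons, ih]
    split_ifs with h1 h2 h3 h2 h3 h3 <;> simp_all <;> omega

-- A's inner two loops append doc_id once per qualifying pair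
lemma foldl_append_replicate (c : Int → Nat) (doc : Int) :
    ∀ (l : List Int) (acc : List Int),
    l.foldl (fun acc p => acc ++ List.replicate (c p) doc) acc
      = acc ++ List.replicate ((l.map c).sum) doc := by
  intro l
  induction l with
  | nil => simp
  | cons y t ih =>
    intro acc
    simp only [List.foldl_cons, List.map_cons, List.sum_cons, ih, List.replicate_add,
      List.append_assoc]

lemma sum_nonpos_of_forall (l : List Int) (h : ∀ x ∈ l, x ≤ 0) : l.sum ≤ 0 := by
  induction l with
  | nil => simp
  | cons y t ih =>
    simp only [List.sum_cons]
    have := h y (List.mem_cons_self)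
    have := ih (fun x hx => h x (List.mem_cons_of_mem _ hx))
    omega

-- the per-document bodies of the two folds agree
lemma per_doc (ps1 ps2 : List Int) (k : Int) (doc : Int) (acc : List Int) :
    ps1.foldl (fun acc pos1 =>
      ps2.foldl (fun acc pos2 => if |pos1 - pos2| ≤ k then acc ++ [doc] else acc) acc) acc
    = acc ++ List.replicate
        (ps1.foldl (fun n p =>
          n + ((countLess (PySem.List.sorted ps2 (fun q => q)) (p + k + 1) : Int)
             - (countLess (PySem.List.sorted ps2 (fun q => q)) (p - k) : Int))) 0).toNat doc := by
  set s2 := PySem.List.sorted ps2 (fun q => q) with hs2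
  have hsorted : s2.Pairwise (· ≤ ·) := PySem.List.sorted_pairwise ps2 (fun q => q)
  have hperm : s2.Perm ps2 := PySem.List.sorted_perm ps2 (fun q => q) false
  -- A's side: nested append-if fold = replicate of the pair count
  have hA : ps1.foldl (fun acc pos1 =>
      ps2.foldl (fun acc pos2 => if |pos1 - pos2| ≤ k then acc ++ [doc] else acc) acc) acc
      = acc ++ List.replicate ((ps1.map (fun p => ps2.countP (fun q => decide (|p - q| ≤ k)))).sum) doc := by
    have hstep : (fun (acc : List Int) (pos1 : Int) =>
        ps2.foldl (fun acc pos2 => if |pos1 - pos2| ≤ k then acc ++ [doc] else acc) acc)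
        = fun acc pos1 => acc ++ List.replicate (ps2.countP (fun q => decide (|pos1 - q| ≤ k))) doc := by
      funext acc p
      have h := PySem.List.foldl_append_if (fun q => decide (|p - q| ≤ k)) (fun _ => doc) ps2 acc
      simp only [decide_eq_true_eq] at h
      rw [h, List.map_const', ← List.countP_eq_length_filter]
    rw [hstep, foldl_append_replicate]
  rw [hA, PySem.List.foldl_add]
  congr 1
  -- remaining: the two counts agree
  by_cases hk : 0 ≤ k
  · -- k ≥ 0 : binary-search difference = pair count, termwise
    have hterm : ∀ p : Int,
        ((countLess s2 (p + k + 1) : Int) - (countLess s2 (p - k) : Int))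
        = ((ps2.countP (fun q => decide (|p - q| ≤ k)) : Nat) : Int) := by
      intro p
      rw [countLess_eq s2 _ hsorted, countLess_eq s2 _ hsorted]
      rw [countP_lt_split (p - k) (p + k + 1) (by omega) s2]
      have hmid : s2.countP (fun q => decide (p - k ≤ q ∧ q < p + k + 1))
          = ps2.countP (fun q => decide (|p - q| ≤ k)) := by
        rw [hperm.countP_eq]
        apply List.countP_congr
        intro q _
        constructor
        · intro h
          simp only [decide_eq_true_eq] at h ⊢
          rw [abs_le]; omega
        · intro h
          simp only [decide_eq_true_eq, abs_le] at h ⊢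
          omega
      rw [hmid]
      push_cast
      omega
    have : (ps1.map (fun p => (countLess s2 (p + k + 1) : Int) - (countLess s2 (p - k) : Int)))
        = ps1.map (fun p => ((ps2.countP (fun q => decide (|p - q| ≤ k)) : Nat) : Int)) :=
      List.map_congr_left (fun p _ => hterm p)
    rw [zero_add, this]
    rw [show (ps1.map (fun p => ((ps2.countP (fun q => decide (|p - q| ≤ k)) : Nat) : Int)))
        = (ps1.map (fun p => ps2.countP (fun q => decide (|p - q| ≤ k)))).map Nat.cast by
      simp [List.map_map, Function.comp_def]]
    rw [← Nat.cast_list_sum, Int.toNat_natCast]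
  · -- k < 0 : no pair qualifies and every binary-search difference is ≤ 0
    have hzero : ∀ p : Int, ps2.countP (fun q => decide (|p - q| ≤ k)) = 0 := by
      intro p
      rw [List.countP_eq_zero]
      intro q _
      simp only [decide_eq_true_eq]
      intro h
      have := abs_nonneg (p - q)
      omega
    have hA0 : (ps1.map (fun p => ps2.countP (fun q => decide (|p - q| ≤ k)))).sum = 0 := by
      rw [show (ps1.map (fun p => ps2.countP (fun q => decide (|p - q| ≤ k)))) = ps1.map (fun _ => 0) from
        List.map_congr_left (fun p _ => hzero p)]
      simp
    have hB0 : (0 : Int) + (ps1.map (fun p =>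
        (countLess s2 (p + k + 1) : Int) - (countLess s2 (p - k) : Int))).sum ≤ 0 := by
      rw [zero_add]
      apply sum_nonpos_of_forall
      intro x hx
      rcases List.mem_map.mp hx with ⟨p, _, rfl⟩
      rw [countLess_eq s2 _ hsorted, countLess_eq s2 _ hsorted]
      have : s2.countP (fun q => decide (q < p + k + 1)) ≤ s2.countP (fun q => decide (q < p - k)) := by
        apply List.countP_mono_left
        intro q _ h
        simp only [decide_eq_true_eq] at h ⊢
        omega
      omega
    rw [hA0, Int.toNat_of_nonpos hB0]

-- the two document loops have equal step functions
lemma step_eq (d1 d2 : PySem.Dict Int (List Int)) (k : Int) :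
    (fun (acc : List Int) (doc_id : Int) =>
      if d2.contains doc_id then
        ((d1.get? doc_id).getD []).foldl (fun acc pos1 =>
          ((d2.get? doc_id).getD []).foldl (fun acc pos2 =>
            if |pos1 - pos2| ≤ k then acc ++ [doc_id] else acc) acc) acc
      else acc)
    = fun acc doc_id =>
      if d2.contains doc_id then
        acc ++ List.replicate
          (((d1.get? doc_id).getD []).foldl (fun n p =>
            n + ((countLess (PySem.List.sorted ((d2.get? doc_id).getD []) (fun q => q)) (p + k + 1) : Int)
               - (countLess (PySem.List.sorted ((d2.get? doc_id).getD []) (fun q => q)) (p - k) : Int))) 0).toNat doc_id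
      else acc := by
  funext acc doc
  by_cases hc : d2.contains doc
  · rw [if_pos hc, if_pos hc]
    exact per_doc ((d1.get? doc).getD []) ((d2.get? doc).getD []) k doc acc
  · rw [if_neg hc, if_neg hc]

-- ===== VERDICT (by name: the statement is the Claim_ definition above) =====
theorem near_operator_spec : Claim_equal_near_operator := by
  intro term1 term2 k positional_index _
  unfold Spec_near_operator near_operator near_operator_alt
  by_cases h1 : (PySem.Dict.mk positional_index).contains term1
  · by_cases h2 : (PySem.Dict.mk positional_index).contains term2
    · simp only [h1, h2, Bool.and_self, Bool.not_true, Bool.or_self, Bool.false_eq_true,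
        if_true, if_false]
      rw [step_eq]
    · simp [h1, h2]
  · simp [h1]
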